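-- pv_equiv track=rewrite | github.com/nextstrain/mpox | nextclade/scripts/deduplicate.py | composition_per_site
-- ===== SOURCE A (Python) =====
-- def composition_per_site(sequences) -> list:
--     """
--     Compute the composition of each site in a list of sequences
--     """
--     length = len(sequences[0]["seq"])
--     composition = [{} for _ in range(length)]
--     for sequence in sequences:
--         for i, c in enumerate(sequence["seq"]):
--             if c not in composition[i]:
--                 composition[i][c] = 0
--             # Increment the count for that character
--             composition[i][c] += 1
--     return composition
-- ===== SOURCE B (Python) =====
-- def composition_per_site(sequences) -> list:
--     """
--     Compute the composition of each site in a list of sequences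
--     """
--     length = len(sequences[0]["seq"])
--     result = []
--     for i in range(length):
--         column = [s["seq"][i] for s in sequences if i < len(s["seq"])]
--         result.append({c: column.count(c) for c in dict.fromkeys(column)})
--     return result
-- ===== Notes on version B (the rewrite author's own statement) =====
-- stated objective: idiomatic
-- what changed: B transposes the problem: for each site index it extracts the column of characters across sequences and builds its frequency dict by ordered dedup + count, instead of A's per-sequence scan that scatters increments into a preallocated list of per-site dicts.
import Mathlib
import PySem

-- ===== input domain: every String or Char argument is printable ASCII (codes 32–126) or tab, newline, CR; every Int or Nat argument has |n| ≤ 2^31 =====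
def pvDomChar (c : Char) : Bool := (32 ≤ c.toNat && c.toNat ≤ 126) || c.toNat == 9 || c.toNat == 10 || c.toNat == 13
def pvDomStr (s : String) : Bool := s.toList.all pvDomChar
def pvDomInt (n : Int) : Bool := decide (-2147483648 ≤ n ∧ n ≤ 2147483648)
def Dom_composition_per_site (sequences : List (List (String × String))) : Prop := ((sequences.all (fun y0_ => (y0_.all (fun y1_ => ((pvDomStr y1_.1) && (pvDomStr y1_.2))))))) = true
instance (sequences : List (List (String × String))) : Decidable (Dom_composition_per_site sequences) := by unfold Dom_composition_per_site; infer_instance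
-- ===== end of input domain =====

-- B counts column-by-column (per-site frequency via ordered dedup + count) instead of scanning each
-- sequence and scattering increments into per-site dicts; objective: idiomatic/alternative, same result.


-- shared helper: sequence["seq"] (a missing key raises KeyError in Python — excluded by Pre_)
def pvSeq (sequence : List (String × String)) : String :=
  (PySem.Dict.mk sequence).getD "seq" ""

-- ===== PORT A =====
def composition_per_site (sequences : List (List (String × String))) : List (List (String × Int)) :=
  -- sequences[0]["seq"]: empty input raises IndexError in Python — excluded by Pre_
  let length := (pvSeq (sequences.headD [])).toList.length
  let init : List (PySem.Dict String Int) :=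
    (PySem.List.pyRange 0 (length : Int) 1).map (fun _ => PySem.Dict.empty)
  let composition := sequences.foldl (fun comp sequence =>
    (PySem.List.enumerate (pvSeq sequence).toList 0).foldl (fun comp p =>
      -- 'if c not in composition[i]: composition[i][c] = 0' then '+= 1' = insert c (getD c 0 + 1);
      -- i out of range (a sequence longer than the first) raises IndexError in Python — excluded by Pre_
      comp.modify p.1.toNat (fun d =>
        d.insert (String.ofList [p.2]) (d.getD (String.ofList [p.2]) 0 + 1))) comp) init
  composition.map (fun d => d.items)

-- ===== PORT B =====
def composition_per_site_alt (sequences : List (List (String × String))) : List (List (String × Int)) :=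
  let length := (pvSeq (sequences.headD [])).toList.length
  (PySem.List.pyRange 0 (length : Int) 1).map (fun i =>
    let column : List String :=
      (sequences.filter (fun s => i < ((pvSeq s).toList.length : Int))).map
        (fun s => String.ofList [PySem.List.pyGetD (pvSeq s).toList i ' '])
    (PySem.List.dedup column).map (fun c => (c, (PySem.List.count column c : Int))))

-- ===== PRECONDITION & SPEC =====
-- Pre_ = exactly the inputs where the Python A returns: a nonempty list, every element has a "seq"
-- key, and no sequence is longer than the first (else IndexError/KeyError).
def Pre_composition_per_site (sequences : List (List (String × String))) : Prop :=
  sequences ≠ [] ∧ ∀ s ∈ sequences,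
    ((PySem.Dict.mk s).get? "seq").isSome = true ∧
    (pvSeq s).toList.length ≤ (pvSeq (sequences.headD [])).toList.length
instance (sequences : List (List (String × String))) : Decidable (Pre_composition_per_site sequences) := by unfold Pre_composition_per_site; infer_instance

def pvWitness_composition_per_site : (List (List (String × String))) :=
  [[("seq", "AC")], [("seq", "AG")], [("seq", "A")]]

def Spec_composition_per_site (sequences : List (List (String × String))) (out : List (List (String × Int))) : Prop := out = composition_per_site_alt sequences
instance (sequences : List (List (String × String))) (out : List (List (String × Int))) : Decidable (Spec_composition_per_site sequences out) := by unfold Spec_composition_per_site; infer_instance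

-- ===== CLAIM (what is proved, stated in full; the proofs are below) =====
def Claim_equal_composition_per_site : Prop := ∀ (sequences : List (List (String × String))), Dom_composition_per_site sequences → Pre_composition_per_site sequences → Spec_composition_per_site sequences (composition_per_site sequences)

-- ===== LEMMAS AND PROOFS =====

-- the per-character dict update of A, on singleton-string keys
def pvUpdS (d : PySem.Dict String Int) (x : String) : PySem.Dict String Int :=
  d.insert x (d.getD x 0 + 1)

-- the characters appearing at position j, as singleton strings, in sequence order
def pvCol (j : Nat) (seqs : List (List (String × String))) : List String :=
  seqs.flatMap (fun s => (((pvSeq s).toList[j]?).map (fun c => String.ofList [c])).toList)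

-- A's inner loop, pointwise: only position j - k is touched at slot j
lemma pvInner_getElem? (cs : List Char) :
    ∀ (k : Nat) (comp : List (PySem.Dict String Int)) (j : Nat),
    ((PySem.List.enumerate cs (k : Int)).foldl
        (fun comp p => comp.modify p.1.toNat (fun d =>
          d.insert (String.ofList [p.2]) (d.getD (String.ofList [p.2]) 0 + 1))) comp)[j]?
      = if k ≤ j then
          comp[j]?.map (fun d => (cs[j - k]?).elim d (fun c => pvUpdS d (String.ofList [c])))
        else comp[j]? := by
  induction cs with
  | nil =>
    intro k comp j
    rw [PySem.List.enumerate_nil, List.foldl_nil]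
    by_cases hk : k ≤ j
    · rw [if_pos hk]; cases comp[j]? <;> simp
    · rw [if_neg hk]
  | cons c cs ih =>
    intro k comp j
    rw [PySem.List.enumerate_cons, List.foldl_cons]
    have h1 : ((k : Int) + 1) = ((k + 1 : Nat) : Int) := by push_cast; ring
    rw [h1, ih (k + 1)]
    have htn : ((k : Int)).toNat = k := Int.toNat_natCast k
    rw [htn]
    by_cases hjk : j < k
    · rw [if_neg (by omega), if_neg (by omega)]
      rw [List.getElem?_modify]
      have hne : ¬ (k = j) := by omega
      cases comp[j]? <;> simp [hne]
    · by_cases hje : j = k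
      · subst hje
        rw [if_neg (by omega), if_pos (le_refl j)]
        rw [List.getElem?_modify]
        cases comp[j]? <;> simp [pvUpdS]
      · have hk1 : k + 1 ≤ j := by omega
        rw [if_pos hk1, if_pos (by omega)]
        rw [List.getElem?_modify]
        have hne : ¬ (k = j) := by omega
        have hidx : j - k = (j - (k + 1)) + 1 := by omega
        rw [hidx]
        cases comp[j]? <;> simp [hne]

-- A's outer loop, pointwise: slot j accumulates exactly the column at j
lemma pvOuter_getElem? (seqs : List (List (String × String))) :
    ∀ (comp : List (PySem.Dict String Int)) (j : Nat),
    ((seqs.foldl (fun comp sequence =>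
        (PySem.List.enumerate (pvSeq sequence).toList 0).foldl
          (fun comp p => comp.modify p.1.toNat (fun d =>
            d.insert (String.ofList [p.2]) (d.getD (String.ofList [p.2]) 0 + 1))) comp) comp))[j]?
      = comp[j]?.map (fun d => (pvCol j seqs).foldl pvUpdS d) := by
  induction seqs with
  | nil => intro comp j; rw [List.foldl_nil]; cases comp[j]? <;> simp [pvCol]
  | cons s seqs ih =>
    intro comp j
    rw [List.foldl_cons, ih]
    have hin := pvInner_getElem? (pvSeq s).toList 0 comp j
    simp only [Nat.cast_zero, Nat.sub_zero] at hin
    rw [hin, if_pos (Nat.zero_le j)]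
    have hcol : pvCol j (s :: seqs)
        = ((((pvSeq s).toList[j]?).map (fun c => String.ofList [c])).toList) ++ pvCol j seqs := by
      simp [pvCol]
    rw [hcol]
    cases hc : (pvSeq s).toList[j]? with
    | none => cases comp[j]? <;> simp
    | some c => cases comp[j]? <;> simp

-- B's column equals the flatMap column
lemma pvColumn_eq (seqs : List (List (String × String))) (j : Nat) :
    (seqs.filter (fun s => (j : Int) < ((pvSeq s).toList.length : Int))).map
      (fun s => String.ofList [PySem.List.pyGetD (pvSeq s).toList (j : Int) ' '])
      = pvCol j seqs := by
  induction seqs with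
  | nil => simp [pvCol]
  | cons s seqs ih =>
    by_cases h : j < (pvSeq s).toList.length
    · rw [List.filter_cons_of_pos (by simpa using h), List.map_cons, ih]
      have hget : (pvSeq s).toList[j]? = some ((pvSeq s).toList[j]'h) :=
        List.getElem?_eq_getElem h
      have hpy : PySem.List.pyGetD (pvSeq s).toList (j : Int) ' ' = (pvSeq s).toList[j]'h := by
        rw [PySem.List.pyGetD_natCast, List.getD_eq_getElem?_getD, hget]; rfl
      rw [hpy]
      have : pvCol j (s :: seqs)
          = ((((pvSeq s).toList[j]?).map (fun c => String.ofList [c])).toList) ++ pvCol j seqs := by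
        simp [pvCol]
      rw [this, hget]
      rfl
    · rw [List.filter_cons_of_neg (by simpa using h)]
      have hnone : (pvSeq s).toList[j]? = none := by
        rw [List.getElem?_eq_none_iff]; omega
      have : pvCol j (s :: seqs)
          = ((((pvSeq s).toList[j]?).map (fun c => String.ofList [c])).toList) ++ pvCol j seqs := by
        simp [pvCol]
      rw [this, hnone, ih]
      rfl

-- ===== VERDICT (by name: the statement is the Claim_ definition above) =====
theorem composition_per_site_spec : Claim_equal_composition_per_site := by
  intro sequences _ _
  unfold Spec_composition_per_site composition_per_site composition_per_site_alt
  simp only []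
  apply List.ext_getElem?
  intro j
  set n := (pvSeq (sequences.headD [])).toList.length with hn
  rw [List.getElem?_map, pvOuter_getElem?]
  rw [PySem.List.pyRange_zero_nat n, List.map_map, List.map_map]
  by_cases hj : j < n
  · rw [List.getElem?_map, List.getElem?_map, List.getElem?_range hj]
    simp only [Option.map_some, Function.comp_apply]
    rw [pvColumn_eq sequences j]
    have hfold : (pvCol j sequences).foldl pvUpdS PySem.Dict.empty
        = PySem.Dict.counter (pvCol j sequences) := by
      rw [← PySem.Dict.foldl_insert_getD_add_one_eq_counter]
      rfl
    rw [hfold, PySem.Dict.items_counter, PySem.List.dedup_eq_ofList]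
    simp [PySem.List.count_eq]
  · have h1 : (List.range n)[j]? = none := List.getElem?_eq_none_iff.mpr (by simpa using Nat.le_of_not_lt hj)
    simp [h1]
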